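-- pv_equiv track=rewrite | github.com/wallekim/Calc | main.py | check_mistake
-- ===== SOURCE A (Python) =====
-- def check_mistake(s):
--     b = False
--
--     d ={
--         '+': 1,
--         '-': 1,
--         '*': 1,
--         '/': 1
--         }
--
--     for i in range(len(s)-1):
--         if s[i] in d:
--             if s[i+1].isdigit() == True:
--                 b = True
--             else:
--                 return False
--
--     return b
-- ===== SOURCE B (Python) =====
-- def check_mistake(s):
--     # Staged per-operator passes: one dedicated scan of the string for each of
--     # the four operators (order of discoveries does not matter: the result is a
--     # conjunction over all operator occurrences plus an existence flag).
--     found = False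
--     for op in '+-*/':
--         for i in range(len(s) - 1):
--             if s[i] == op:
--                 if s[i + 1].isdigit():
--                     found = True
--                 else:
--                     return False
--     return found
-- ===== Notes on version B (the rewrite author's own statement) =====
-- stated objective: alternative
-- what changed: Replaces A's single interleaved scan (flag-carrying loop testing membership in a 4-key operator dict at each position) by four staged passes, one dedicated scan per operator; order of discoveries is irrelevant because the result is a conjunction over all operator occurrences plus an existence flag.
import Mathlib
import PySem

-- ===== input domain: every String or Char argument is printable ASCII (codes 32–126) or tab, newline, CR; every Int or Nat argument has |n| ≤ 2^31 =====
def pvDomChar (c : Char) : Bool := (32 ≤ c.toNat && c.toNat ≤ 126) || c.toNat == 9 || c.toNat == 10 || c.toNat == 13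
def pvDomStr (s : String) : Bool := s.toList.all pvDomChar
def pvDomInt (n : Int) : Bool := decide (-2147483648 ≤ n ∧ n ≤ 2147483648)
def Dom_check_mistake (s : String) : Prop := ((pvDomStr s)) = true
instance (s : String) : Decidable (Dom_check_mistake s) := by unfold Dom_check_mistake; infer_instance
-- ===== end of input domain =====

-- B replaces A's single interleaved scan (one flag-carrying pass testing membership in a
-- 4-operator dict) by four staged passes, one dedicated scan per operator; same cost.

-- ===== PORT A =====
-- A's loop over i in range(len(s)-1): walks the char list looking at adjacent pairs,
-- carrying the flag b, with early return False.
def check_mistake_loop : List Char → Bool → Bool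
  | c1 :: c2 :: rest, b =>
      if c1 = '+' ∨ c1 = '-' ∨ c1 = '*' ∨ c1 = '/' then
        if PySem.Chars.isdigit c2 then check_mistake_loop (c2 :: rest) true
        else false
      else check_mistake_loop (c2 :: rest) b
  | _, b => b

def check_mistake (s : String) : Bool := check_mistake_loop s.toList false

-- ===== PORT B =====
-- B's inner loop for ONE fixed operator: scans adjacent pairs, looking only at this
-- operator's occurrences; `none` models B's early `return False`.
def check_mistake_scanOp (op : Char) : List Char → Bool → Option Bool
  | c1 :: c2 :: rest, f =>
      if c1 = op then
        if PySem.Chars.isdigit c2 then check_mistake_scanOp op (c2 :: rest) true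
        else none
      else check_mistake_scanOp op (c2 :: rest) f
  | _, f => some f

-- B's outer loop over the four operators, threading `found` (early return = none).
def check_mistake_alt (s : String) : Bool :=
  (['+', '-', '*', '/'].foldl (fun acc op => acc.bind (check_mistake_scanOp op s.toList))
    (some false)).getD false

-- ===== PRECONDITION & SPEC =====
def Spec_check_mistake (s : String) (out : Bool) : Prop := out = check_mistake_alt s
instance (s : String) (out : Bool) : Decidable (Spec_check_mistake s out) := by unfold Spec_check_mistake; infer_instance

-- ===== CLAIM =====
def Claim_equal_check_mistake : Prop := ∀ (s : String), Dom_check_mistake s → Spec_check_mistake s (check_mistake s)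

-- ===== LEMMAS AND PROOFS =====
-- the characters following positions whose character passes `t`, over the pair list
def pvFol (t : Char → Bool) (ps : List (Char × Char)) : List Char :=
  ps.filterMap (fun p => if t p.1 then some p.2 else none)

lemma pvFol_cons (t : Char → Bool) (p : Char × Char) (ps : List (Char × Char)) :
    pvFol t (p :: ps) = if t p.1 then p.2 :: pvFol t ps else pvFol t ps := by
  simp only [pvFol, List.filterMap_cons]
  by_cases h : t p.1 <;> simp [h]

lemma pvFol_all (t : Char → Bool) (d : Char → Bool) (ps : List (Char × Char)) :
    (pvFol t ps).all d = ps.all (fun p => !t p.1 || d p.2) := by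
  induction ps with
  | nil => rfl
  | cons p ps ih =>
    rw [pvFol_cons]
    by_cases h : t p.1 <;> simp [h, ih]

lemma pvFol_isEmpty (t : Char → Bool) (ps : List (Char × Char)) :
    (pvFol t ps).isEmpty = ps.all (fun p => !t p.1) := by
  induction ps with
  | nil => rfl
  | cons p ps ih =>
    rw [pvFol_cons]
    by_cases h : t p.1 <;> simp [h, ih]

lemma pv_all_ext {α : Type} (l : List α) (f g : α → Bool) (h : ∀ x, f x = g x) :
    l.all f = l.all g := by
  have : f = g := funext h
  rw [this]

lemma pv_all_and {α : Type} (l : List α) (f g : α → Bool) :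
    l.all (fun x => f x && g x) = (l.all f && l.all g) := by
  induction l with
  | nil => rfl
  | cons x l ih =>
    simp only [List.all_cons, ih]
    cases f x <;> cases g x <;> cases l.all f <;> cases l.all g <;> rfl

-- A's loop, characterized via the followers of all four operators at once.
lemma check_mistake_loop_eq (cs : List Char) :
    ∀ b, check_mistake_loop cs b =
      ((pvFol (fun c => c == '+' || c == '-' || c == '*' || c == '/') (cs.zip cs.tail)).all
          PySem.Chars.isdigit
        && (b || !(pvFol (fun c => c == '+' || c == '-' || c == '*' || c == '/')
              (cs.zip cs.tail)).isEmpty)) := by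
  induction cs with
  | nil => intro b; simp [check_mistake_loop, pvFol]
  | cons c1 rest ih =>
    cases rest with
    | nil => intro b; simp [check_mistake_loop, pvFol]
    | cons c2 rest' =>
      intro b
      have hz : ((c1 :: c2 :: rest').zip (c1 :: c2 :: rest').tail)
          = (c1, c2) :: ((c2 :: rest').zip (c2 :: rest').tail) := by simp
      rw [hz, pvFol_cons]
      simp only [check_mistake_loop]
      by_cases hop : c1 = '+' ∨ c1 = '-' ∨ c1 = '*' ∨ c1 = '/'
      · have ht : (c1 == '+' || c1 == '-' || c1 == '*' || c1 == '/') = true := by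
          rcases hop with h | h | h | h <;> simp [h]
        by_cases hd : PySem.Chars.isdigit c2
        · rw [if_pos hop, if_pos hd, ih true]
          simp [ht, hd]
        · rw [if_pos hop, if_neg hd]
          simp [ht, hd]
      · have ht : (c1 == '+' || c1 == '-' || c1 == '*' || c1 == '/') = false := by
          simp only [Bool.or_eq_false_iff, beq_eq_false_iff_ne, ne_eq]
          exact ⟨⟨⟨fun h => hop (Or.inl h), fun h => hop (Or.inr (Or.inl h))⟩,
            fun h => hop (Or.inr (Or.inr (Or.inl h)))⟩,
            fun h => hop (Or.inr (Or.inr (Or.inr h)))⟩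
        rw [if_neg hop, ih b]
        simp [ht]

-- B's single-operator scan, characterized via that operator's followers.
lemma check_mistake_scanOp_eq (op : Char) (cs : List Char) :
    ∀ f, check_mistake_scanOp op cs f =
      (if (pvFol (fun c => c == op) (cs.zip cs.tail)).all PySem.Chars.isdigit
       then some (f || !(pvFol (fun c => c == op) (cs.zip cs.tail)).isEmpty)
       else none) := by
  induction cs with
  | nil => intro f; simp [check_mistake_scanOp, pvFol]
  | cons c1 rest ih =>
    cases rest with
    | nil => intro f; simp [check_mistake_scanOp, pvFol]
    | cons c2 rest' =>
      intro f
      have hz : ((c1 :: c2 :: rest').zip (c1 :: c2 :: rest').tail)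
          = (c1, c2) :: ((c2 :: rest').zip (c2 :: rest').tail) := by simp
      rw [hz, pvFol_cons]
      simp only [check_mistake_scanOp]
      by_cases hop : c1 = op
      · by_cases hd : PySem.Chars.isdigit c2
        · rw [if_pos hop, if_pos hd, ih true]
          simp [hop, hd]
        · rw [if_pos hop, if_neg hd]
          simp [hop, hd]
      · rw [if_neg hop, ih f]
        simp [hop]

-- ===== VERDICT =====
theorem check_mistake_spec : Claim_equal_check_mistake := by
  intro s _
  unfold Spec_check_mistake check_mistake check_mistake_alt
  rw [check_mistake_loop_eq]
  have e1 := check_mistake_scanOp_eq '+' s.toList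
  have e2 := check_mistake_scanOp_eq '-' s.toList
  have e3 := check_mistake_scanOp_eq '*' s.toList
  have e4 := check_mistake_scanOp_eq '/' s.toList
  have hall : (pvFol (fun c => c == '+' || c == '-' || c == '*' || c == '/')
      (s.toList.zip s.toList.tail)).all PySem.Chars.isdigit =
    ((pvFol (fun c => c == '+') (s.toList.zip s.toList.tail)).all PySem.Chars.isdigit
      && (pvFol (fun c => c == '-') (s.toList.zip s.toList.tail)).all PySem.Chars.isdigit
      && (pvFol (fun c => c == '*') (s.toList.zip s.toList.tail)).all PySem.Chars.isdigit
      && (pvFol (fun c => c == '/') (s.toList.zip s.toList.tail)).all PySem.Chars.isdigit) := by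
    simp only [pvFol_all, ← pv_all_and]
    apply pv_all_ext
    intro p
    cases h1 : p.1 == '+' <;> cases h2 : p.1 == '-' <;> cases h3 : p.1 == '*' <;>
      cases h4 : p.1 == '/' <;> cases hd : PySem.Chars.isdigit p.2 <;> rfl
  have hemp : (pvFol (fun c => c == '+' || c == '-' || c == '*' || c == '/')
      (s.toList.zip s.toList.tail)).isEmpty =
    ((pvFol (fun c => c == '+') (s.toList.zip s.toList.tail)).isEmpty
      && (pvFol (fun c => c == '-') (s.toList.zip s.toList.tail)).isEmpty
      && (pvFol (fun c => c == '*') (s.toList.zip s.toList.tail)).isEmpty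
      && (pvFol (fun c => c == '/') (s.toList.zip s.toList.tail)).isEmpty) := by
    simp only [pvFol_isEmpty, ← pv_all_and]
    apply pv_all_ext
    intro p
    cases h1 : p.1 == '+' <;> cases h2 : p.1 == '-' <;> cases h3 : p.1 == '*' <;>
      cases h4 : p.1 == '/' <;> rfl
  simp only [List.foldl]
  by_cases h1 : (pvFol (fun c => c == '+') (s.toList.zip s.toList.tail)).all
      PySem.Chars.isdigit <;>
  by_cases h2 : (pvFol (fun c => c == '-') (s.toList.zip s.toList.tail)).all
      PySem.Chars.isdigit <;>
  by_cases h3 : (pvFol (fun c => c == '*') (s.toList.zip s.toList.tail)).all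
      PySem.Chars.isdigit <;>
  by_cases h4 : (pvFol (fun c => c == '/') (s.toList.zip s.toList.tail)).all
      PySem.Chars.isdigit <;>
    simp [e1, e2, e3, e4, h1, h2, h3, h4, hall, hemp, Option.bind]
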